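-- pv_equiv track=rewrite | github.com/longsizhuo/AlgorithmPractice | loong's code/contest/蓝桥杯/聪明的交换策略.py | min_swaps_for_color
-- ===== SOURCE A (Python) =====
-- def min_swaps_for_color(boxes, color, count):
--     # 计算特定颜色聚集所需的最少交换次数
--     swaps_needed = 0
--     color_count = 0
--
--     # 遍历盒子，计算到达目标位置所需的交换次数
--     for i, box in enumerate(boxes):
--         if box == color:
--             swaps_needed += i - color_count
--             color_count += 1
--         # 当已经统计足够数量的特定颜色盒子时停止
--         if color_count == count:
--             break
--
--     return swaps_needed
-- ===== SOURCE B (Python) =====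
-- def min_swaps_for_color(boxes, color, count):
--     # Stage 1: locate the effective end of the scan (where A's break fires).
--     n = len(boxes)
--     end = n
--     matched = 0
--     for i in range(n):
--         if boxes[i] == color:
--             matched += 1
--         if matched == count:
--             end = i + 1
--             break
--     # Stage 2: per-position count of non-matching boxes standing before it.
--     prefix = boxes[:end]
--     mismatches_before = []
--     acc = 0
--     for b in prefix:
--         mismatches_before.append(acc)
--         if b != color:
--             acc += 1
--     # Stage 3: each matching box costs exactly the mismatches before it.
--     return sum(m for b, m in zip(prefix, mismatches_before) if b == color)
-- ===== Notes on version B (the rewrite author's own statement) =====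
-- stated objective: alternative
-- what changed: B replaces A's single-pass index/rank accumulator by three staged passes: first find the break point, then build a per-position table of mismatch counts, then sum that table over the matching positions (each match costs the non-matching boxes before it, no index arithmetic).
import Mathlib
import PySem

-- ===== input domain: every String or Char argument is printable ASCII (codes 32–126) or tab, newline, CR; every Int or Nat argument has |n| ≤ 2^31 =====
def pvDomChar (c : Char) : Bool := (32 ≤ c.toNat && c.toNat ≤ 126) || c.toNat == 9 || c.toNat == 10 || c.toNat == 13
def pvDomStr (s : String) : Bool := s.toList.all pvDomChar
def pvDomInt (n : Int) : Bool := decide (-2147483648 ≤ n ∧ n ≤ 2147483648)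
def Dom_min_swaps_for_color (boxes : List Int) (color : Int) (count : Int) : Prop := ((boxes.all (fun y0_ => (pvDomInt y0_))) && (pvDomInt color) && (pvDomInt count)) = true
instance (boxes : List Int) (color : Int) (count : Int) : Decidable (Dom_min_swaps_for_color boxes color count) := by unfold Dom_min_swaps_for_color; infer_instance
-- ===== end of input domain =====

-- B replaces A's inline index/rank accumulator by three staged passes (find break point; build mismatch-count table; sum it over matches) — alternative decomposition, same cost.

-- ===== PORT A =====
-- loop over enumerate(boxes): state (swaps_needed, color_count), break when color_count == count (checked after the per-box update)
def pvLoopA (color count : Int) : List Int → Int → Int → Int → Int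
  | [], _, swaps, _ => swaps
  | b :: rest, i, swaps, cnt =>
    let swaps' := if b = color then swaps + i - cnt else swaps
    let cnt' := if b = color then cnt + 1 else cnt
    if cnt' = count then swaps' else pvLoopA color count rest (i + 1) swaps' cnt'

def min_swaps_for_color (boxes : List Int) (color : Int) (count : Int) : Int :=
  pvLoopA color count boxes 0 0 0

-- ===== PORT B =====
-- Stage 1: scan for the break point; returns `end` (defaults to n when no break)
def pvFindEnd (color count n : Int) : List Int → Int → Int → Int
  | [], _, _ => n
  | b :: rest, i, matched =>
    let matched' := if b = color then matched + 1 else matched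
    if matched' = count then i + 1 else pvFindEnd color count n rest (i + 1) matched'

-- Stage 2: the list `mismatches_before` (append-accumulator loop, written as cons recursion over the prefix)
def pvMB (color : Int) : List Int → Int → List Int
  | [], _ => []
  | b :: rest, acc => acc :: pvMB color rest (if b ≠ color then acc + 1 else acc)

def min_swaps_for_color_alt (boxes : List Int) (color : Int) (count : Int) : Int :=
  let n : Int := boxes.length
  let e := pvFindEnd color count n boxes 0 0
  let pref := PySem.List.slice boxes none (some e)   -- boxes[:end]
  let mb := pvMB color pref 0
  (((pref.zip mb).filter (fun p => p.1 = color)).map (fun p => p.2)).sum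

-- ===== PRECONDITION & SPEC =====
def Spec_min_swaps_for_color (boxes : List Int) (color : Int) (count : Int) (out : Int) : Prop := out = min_swaps_for_color_alt boxes color count
instance (boxes : List Int) (color : Int) (count : Int) (out : Int) : Decidable (Spec_min_swaps_for_color boxes color count out) := by unfold Spec_min_swaps_for_color; infer_instance

-- ===== CLAIM (what is proved, stated in full; the proofs are below) =====
def Claim_equal_min_swaps_for_color : Prop := ∀ (boxes : List Int) (color : Int) (count : Int), Dom_min_swaps_for_color boxes color count → Spec_min_swaps_for_color boxes color count (min_swaps_for_color boxes color count)

-- ===== LEMMAS AND PROOFS =====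
-- common reference function: contribution of the remaining suffix, given the
-- number of mismatches `acc` and matches `cnt` already seen
def pvRef (color count : Int) : List Int → Int → Int → Int
  | [], _, _ => 0
  | b :: rest, acc, cnt =>
    if b = color then
      if cnt + 1 = count then acc else acc + pvRef color count rest acc (cnt + 1)
    else
      if cnt = count then 0 else pvRef color count rest (acc + 1) cnt

theorem pvLoopA_eq_ref (color count : Int) :
    ∀ (rest : List Int) (i swaps cnt : Int),
      pvLoopA color count rest i swaps cnt = swaps + pvRef color count rest (i - cnt) cnt := by
  intro rest
  induction rest with
  | nil => intro i swaps cnt; simp [pvLoopA, pvRef]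
  | cons b rest ih =>
    intro i swaps cnt
    simp only [pvLoopA, pvRef]
    by_cases hb : b = color
    · simp only [if_pos hb]
      by_cases hc : cnt + 1 = count
      · simp only [if_pos hc]; ring
      · simp only [if_neg hc]
        rw [ih, show i + 1 - (cnt + 1) = i - cnt by ring]; ring
    · simp only [if_neg hb]
      by_cases hc : cnt = count
      · simp only [if_pos hc]; ring
      · simp only [if_neg hc]
        rw [ih, show i + 1 - cnt = i - cnt + 1 by ring]

-- stage-3 value on a list, with the mismatch counter started at acc
def pvS (color : Int) (l : List Int) (acc : Int) : Int :=
  (((l.zip (pvMB color l acc)).filter (fun p => p.1 = color)).map (fun p => p.2)).sum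

theorem pvS_nil (color acc : Int) : pvS color [] acc = 0 := by simp [pvS, pvMB]

theorem pvS_cons (color b acc : Int) (rest : List Int) :
    pvS color (b :: rest) acc =
      (if b = color then acc else 0) + pvS color rest (if b ≠ color then acc + 1 else acc) := by
  by_cases hb : b = color <;> simp [pvS, pvMB, hb]

theorem pvFindEnd_ge (color count : Int) :
    ∀ (rest : List Int) (i matched : Int), n = i + rest.length →
      i ≤ pvFindEnd color count n rest i matched := by
  intro rest
  induction rest with
  | nil => intro i matched h; simp only [pvFindEnd]; simp at h; omega
  | cons b rest ih =>
    intro i matched h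
    simp only [pvFindEnd]
    by_cases hc : (if b = color then matched + 1 else matched) = count
    · rw [if_pos hc]; omega
    · rw [if_neg hc]
      have := ih (i + 1) (if b = color then matched + 1 else matched) (by simp at h ⊢; omega)
      omega

theorem pvS_take_eq_ref (color count : Int) :
    ∀ (rest : List Int) (i matched acc : Int), n = i + rest.length →
      pvS color (rest.take (pvFindEnd color count n rest i matched - i).toNat) acc
        = pvRef color count rest acc matched := by
  intro rest
  induction rest with
  | nil =>
    intro i matched acc h
    simp only [pvFindEnd, List.take_nil, pvS_nil, pvRef]
  | cons b rest ih =>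
    intro i matched acc h
    simp only [pvFindEnd, pvRef]
    by_cases hb : b = color
    · simp only [if_pos hb]
      split_ifs with hc
      · have h1 : (i + 1 - i).toNat = 1 := by omega
        rw [h1]
        simp [pvS_cons, pvS_nil, hb]
      · have hn : n = (i + 1) + rest.length := by simp at h ⊢; omega
        have hge := pvFindEnd_ge (n := n) color count rest (i + 1) (matched + 1) hn
        have h2 : (pvFindEnd color count n rest (i + 1) (matched + 1) - i).toNat
            = (pvFindEnd color count n rest (i + 1) (matched + 1) - (i + 1)).toNat + 1 := by omega
        rw [h2, List.take_succ_cons, pvS_cons]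
        rw [ih (i + 1) (matched + 1) _ hn]
        simp [hb]
    · simp only [if_neg hb]
      split_ifs with hc
      · have h1 : (i + 1 - i).toNat = 1 := by omega
        rw [h1]
        simp [pvS_cons, pvS_nil, hb]
      · have hn : n = (i + 1) + rest.length := by simp at h ⊢; omega
        have hge := pvFindEnd_ge (n := n) color count rest (i + 1) matched hn
        have h2 : (pvFindEnd color count n rest (i + 1) matched - i).toNat
            = (pvFindEnd color count n rest (i + 1) matched - (i + 1)).toNat + 1 := by omega
        rw [h2, List.take_succ_cons, pvS_cons]
        rw [ih (i + 1) matched _ hn]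
        simp [hb]

-- ===== VERDICT (by name: the statement is the Claim_ definition above) =====
theorem min_swaps_for_color_spec : Claim_equal_min_swaps_for_color := by
  intro boxes color count _
  unfold Spec_min_swaps_for_color min_swaps_for_color
  have hn : ((boxes.length : Int)) = 0 + boxes.length := by omega
  have hge := pvFindEnd_ge (n := (boxes.length : Int)) color count boxes 0 0 hn
  have hs := pvS_take_eq_ref (n := (boxes.length : Int)) color count boxes 0 0 0 hn
  have halt : min_swaps_for_color_alt boxes color count
      = pvS color (PySem.List.slice boxes none (some (pvFindEnd color count (boxes.length : Int) boxes 0 0))) 0 := rfl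
  have hslice : PySem.List.slice boxes none (some (pvFindEnd color count (boxes.length : Int) boxes 0 0))
      = boxes.take (pvFindEnd color count (boxes.length : Int) boxes 0 0 - 0).toNat := by
    have hrepr : pvFindEnd color count (boxes.length : Int) boxes 0 0
        = ((pvFindEnd color count (boxes.length : Int) boxes 0 0).toNat : Int) := by omega
    rw [hrepr, PySem.List.slice_to_natCast]
    congr 1
  rw [halt, hslice, pvLoopA_eq_ref]
  rw [show (0 : Int) - 0 = 0 from rfl]
  rw [hs]
  ring
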